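-- pv_equiv track=rewrite | github.com/123zmz123/ConvDBC_To_Code | DBC_to_M.py | _end_bit_to_data_pos
-- ===== SOURCE A (Python) =====
-- def _end_bit_to_data_pos(Sbit_data_num,Sbit_bit_num,data_length): # give the  data_length and data_position of each signal , calculate
--     Ebit_data_num = Sbit_data_num
--     Ebit_bit_num = Sbit_bit_num                                                                            #end_bit's position
--     for count in range(data_length - 1):
--         if Ebit_bit_num < 8:
--             Ebit_bit_num = Ebit_bit_num + 1
--         elif Ebit_bit_num == 8:
--             Ebit_bit_num = 0
--             if Ebit_data_num > 0:
--                 Ebit_data_num = Ebit_data_num- 1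
--     return Ebit_data_num, Ebit_bit_num
-- ===== SOURCE B (Python) =====
-- def _end_bit_to_data_pos(Sbit_data_num, Sbit_bit_num, data_length):
--     # closed form: O(1) instead of A's O(data_length) loop
--     n = max(data_length - 1, 0)
--     b = Sbit_bit_num
--     if b > 8:
--         return Sbit_data_num, b
--     if n <= 8 - b:
--         return Sbit_data_num, b + n
--     r = n - (8 - b) - 1
--     wraps = 1 + r // 9
--     bit = r % 9
--     d = Sbit_data_num
--     if d > 0:
--         d = max(d - wraps, 0)
--     return d, bit
-- ===== Notes on version B (the rewrite author's own statement) =====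
-- stated objective: faster
-- what changed: Replaces A's per-bit loop over range(data_length-1) with an O(1) closed form: divmod of the remaining steps over the 9-value bit cycle, counting wraps and clamping the byte counter at 0.
import Mathlib
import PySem

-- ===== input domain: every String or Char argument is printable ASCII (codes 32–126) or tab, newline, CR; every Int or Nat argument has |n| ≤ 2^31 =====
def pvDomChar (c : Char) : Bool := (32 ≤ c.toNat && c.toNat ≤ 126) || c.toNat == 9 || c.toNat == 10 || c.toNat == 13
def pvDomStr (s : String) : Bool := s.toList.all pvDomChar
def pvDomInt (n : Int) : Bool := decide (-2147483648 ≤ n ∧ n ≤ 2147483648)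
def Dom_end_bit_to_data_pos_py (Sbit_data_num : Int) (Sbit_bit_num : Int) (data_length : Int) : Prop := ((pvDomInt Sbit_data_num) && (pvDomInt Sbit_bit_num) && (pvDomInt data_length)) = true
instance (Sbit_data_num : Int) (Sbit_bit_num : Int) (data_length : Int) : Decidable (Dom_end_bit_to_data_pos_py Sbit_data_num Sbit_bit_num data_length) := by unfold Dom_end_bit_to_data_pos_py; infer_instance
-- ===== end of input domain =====

-- B replaces A's O(data_length) bit-stepping loop by an O(1) closed form (divmod over the 9-value cycle).

-- ===== PORT A =====
-- one iteration of A's loop body on the state (Ebit_data_num, Ebit_bit_num)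
def pvStepA (s : Int × Int) : Int × Int :=
  if s.2 < 8 then (s.1, s.2 + 1)
  else if s.2 = 8 then ((if s.1 > 0 then s.1 - 1 else s.1), 0)
  else s

-- 'for count in range(data_length - 1)': the body runs (data_length-1).toNat times
def pvLoopA : Nat → (Int × Int) → (Int × Int)
  | 0, s => s
  | k + 1, s => pvLoopA k (pvStepA s)

def end_bit_to_data_pos_py (Sbit_data_num : Int) (Sbit_bit_num : Int) (data_length : Int) : Int × Int :=
  pvLoopA (data_length - 1).toNat (Sbit_data_num, Sbit_bit_num)

-- ===== PORT B =====
def end_bit_to_data_pos_py_alt (Sbit_data_num : Int) (Sbit_bit_num : Int) (data_length : Int) : Int × Int :=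
  let n : Int := max (data_length - 1) 0
  let b := Sbit_bit_num
  if b > 8 then (Sbit_data_num, b)
  else if n ≤ 8 - b then (Sbit_data_num, b + n)
  else
    let r := n - (8 - b) - 1
    let wraps := 1 + PySem.Int.floordiv r 9
    let bit := PySem.Int.mod r 9
    ((if Sbit_data_num > 0 then max (Sbit_data_num - wraps) 0 else Sbit_data_num), bit)

-- ===== PRECONDITION & SPEC =====
def Spec_end_bit_to_data_pos_py (Sbit_data_num : Int) (Sbit_bit_num : Int) (data_length : Int) (out : Int × Int) : Prop := out = end_bit_to_data_pos_py_alt Sbit_data_num Sbit_bit_num data_length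
instance (Sbit_data_num : Int) (Sbit_bit_num : Int) (data_length : Int) (out : Int × Int) : Decidable (Spec_end_bit_to_data_pos_py Sbit_data_num Sbit_bit_num data_length out) := by unfold Spec_end_bit_to_data_pos_py; infer_instance

-- ===== CLAIM (what is proved, stated in full; the proofs are below) =====
def Claim_equal_end_bit_to_data_pos_py : Prop := ∀ (Sbit_data_num : Int) (Sbit_bit_num : Int) (data_length : Int), Dom_end_bit_to_data_pos_py Sbit_data_num Sbit_bit_num data_length → Spec_end_bit_to_data_pos_py Sbit_data_num Sbit_bit_num data_length (end_bit_to_data_pos_py Sbit_data_num Sbit_bit_num data_length)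

-- ===== LEMMAS AND PROOFS =====

-- the closed form B computes, with the step count as an explicit argument
def pvClosed (d b n : Int) : Int × Int :=
  if b > 8 then (d, b)
  else if n ≤ 8 - b then (d, b + n)
  else ((if d > 0 then max (d - (1 + PySem.Int.floordiv (n - (8 - b) - 1) 9)) 0 else d),
        PySem.Int.mod (n - (8 - b) - 1) 9)

lemma pvFd_small (m : Int) (h0 : 0 ≤ m) (h8 : m ≤ 8) :
    PySem.Int.floordiv m 9 = 0 ∧ PySem.Int.mod m 9 = m := by
  rw [PySem.Int.floordiv_eq_ediv_of_pos (by omega), PySem.Int.mod_eq_emod_of_pos (by omega)]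
  omega

lemma pvFd_wrap (m : Int) (h : 9 ≤ m) :
    PySem.Int.floordiv m 9 = 1 + PySem.Int.floordiv (m - 9) 9 ∧
      PySem.Int.mod m 9 = PySem.Int.mod (m - 9) 9 ∧ 0 ≤ PySem.Int.floordiv (m - 9) 9 := by
  rw [PySem.Int.floordiv_eq_ediv_of_pos (by omega), PySem.Int.mod_eq_emod_of_pos (by omega),
    PySem.Int.floordiv_eq_ediv_of_pos (by omega), PySem.Int.mod_eq_emod_of_pos (by omega)]
  refine ⟨by omega, by omega, by omega⟩

lemma pvClosed_step (d b : Int) (n : Int) (hn : 0 ≤ n) :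
    pvClosed d b (n + 1) = pvClosed (pvStepA (d, b)).1 (pvStepA (d, b)).2 n := by
  rcases lt_trichotomy b 8 with hb | hb | hb
  · -- b < 8: the step increments the bit counter
    have hstep : pvStepA (d, b) = (d, b + 1) := by unfold pvStepA; simp [hb]
    rw [hstep]
    show pvClosed d b (n + 1) = pvClosed d (b + 1) n
    unfold pvClosed
    have c1 : ¬ b > 8 := by omega
    have c3 : ¬ b + 1 > 8 := by omega
    by_cases h1 : n + 1 ≤ 8 - b
    · rw [if_neg c1, if_pos h1, if_neg c3, if_pos (by omega : n ≤ 8 - (b + 1))]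
      exact Prod.ext rfl (by ring)
    · rw [if_neg c1, if_neg h1, if_neg c3, if_neg (by omega : ¬ n ≤ 8 - (b + 1))]
      rw [show n + 1 - (8 - b) - 1 = n - (8 - (b + 1)) - 1 by ring]
  · -- b = 8: the step wraps the bit counter and decrements (clamped) the byte counter
    subst hb
    have c1 : ¬ (8:Int) > 8 := by omega
    have c2 : ¬ n + 1 ≤ 8 - (8:Int) := by omega
    have c3 : ¬ (0:Int) > 8 := by omega
    by_cases hd : d > 0
    · have hstep : pvStepA (d, 8) = (d - 1, 0) := by unfold pvStepA; simp [hd]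
      rw [hstep]
      show pvClosed d 8 (n + 1) = pvClosed (d - 1) 0 n
      unfold pvClosed
      rw [if_neg c1, if_neg c3, if_pos hd, show n + 1 - (8 - (8:Int)) - 1 = n by ring,
        if_neg c2]
      by_cases h5 : n ≤ 8 - (0:Int)
      · rw [if_pos h5]
        obtain ⟨hq, hr⟩ := pvFd_small n hn (by omega)
        rw [hq, hr]
        exact Prod.ext (by omega) (by ring)
      · rw [if_neg h5, show n - (8 - (0:Int)) - 1 = n - 9 by ring]
        obtain ⟨hq, hr, hpos⟩ := pvFd_wrap n (by omega)
        rw [hq, hr]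
        by_cases hd1 : d - 1 > 0
        · rw [if_pos hd1]
          exact Prod.ext (by omega) rfl
        · rw [if_neg hd1]
          exact Prod.ext (by omega) rfl
    · have hstep : pvStepA (d, 8) = (d, 0) := by unfold pvStepA; simp [hd]
      rw [hstep]
      show pvClosed d 8 (n + 1) = pvClosed d 0 n
      unfold pvClosed
      rw [if_neg c1, if_neg c3, if_neg hd, show n + 1 - (8 - (8:Int)) - 1 = n by ring,
        if_neg c2]
      by_cases h5 : n ≤ 8 - (0:Int)
      · rw [if_pos h5]
        obtain ⟨hq, hr⟩ := pvFd_small n hn (by omega)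
        rw [hr]
        exact Prod.ext (by omega) (by ring)
      · rw [if_neg h5, show n - (8 - (0:Int)) - 1 = n - 9 by ring]
        obtain ⟨hq, hr, hpos⟩ := pvFd_wrap n (by omega)
        rw [hr, if_neg hd]
  · -- b > 8: the loop body leaves the state unchanged
    have hstep : pvStepA (d, b) = (d, b) := by
      unfold pvStepA; rw [if_neg (by omega), if_neg (by omega)]
    rw [hstep]
    show pvClosed d b (n + 1) = pvClosed d b n
    unfold pvClosed
    rw [if_pos hb, if_pos hb]

lemma pvLoopA_eq_closed (k : Nat) (d b : Int) :
    pvLoopA k (d, b) = pvClosed d b (k : Int) := by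
  induction k generalizing d b with
  | zero =>
    unfold pvLoopA pvClosed
    by_cases hb : b > 8
    · simp [hb]
    · simp [hb]
  | succ m ih =>
    have hs : pvLoopA (m + 1) (d, b) = pvLoopA m (pvStepA (d, b)) := rfl
    have hpair : pvStepA (d, b) = ((pvStepA (d, b)).1, (pvStepA (d, b)).2) := rfl
    rw [hs, hpair, ih]
    rw [show ((m + 1 : Nat) : Int) = (m : Int) + 1 by push_cast; ring]
    exact (pvClosed_step d b (m : Int) (by positivity)).symm

-- ===== VERDICT (by name: the statement is the Claim_ definition above) =====
theorem end_bit_to_data_pos_py_spec : Claim_equal_end_bit_to_data_pos_py := by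
  intro d b dl _
  unfold Spec_end_bit_to_data_pos_py end_bit_to_data_pos_py end_bit_to_data_pos_py_alt
  rw [pvLoopA_eq_closed]
  have hcast : (((dl - 1).toNat : Nat) : Int) = max (dl - 1) 0 := by omega
  rw [hcast]
  unfold pvClosed
  by_cases hb : b > 8
  · simp [hb]
  · by_cases hn : max (dl - 1) 0 ≤ 8 - b <;> simp [hb, hn]
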